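-- pv_equiv track=rewrite | github.com/cr7coder/python-summer2025 | LTTH/Buoi4_25.07.2025/Bai2.py | PHANTICH
-- ===== SOURCE A (Python) =====
-- def PHANTICH(n):
--     if n % 2 != 0:
--         return []
--     ds = []
--     for a in range(2, n, 2):
--         for b in range(2, n - a, 2):
--             for c in range(2, n - a - b, 2):
--                 d = n - a - b - c
--                 if d >= 2 and d % 2 == 0:
--                     ds.append((a, b, c, d))
--     return ds
-- ===== SOURCE B (Python) =====
-- def helper(remaining, parts):
--     # even-valued compositions of `remaining` into exactly `parts` parts, each >= 2
--     if parts == 1: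
--         return [[remaining]] if remaining >= 2 and remaining % 2 == 0 else []
--     res = []
--     for head in range(2, remaining, 2):
--         for tail in helper(remaining - head, parts - 1):
--             res.append([head] + tail)
--     return res
--
-- def PHANTICH(n):
--     if n % 2 != 0:
--         return []
--     return [tuple(q) for q in helper(n, 4)]
-- ===== Notes on version B (the rewrite author's own statement) =====
-- stated objective: alternative
-- what changed: Replaces the hard-coded triple nested loop with a recursive length-parameterised composition generator helper(remaining, parts) that prepends each even head to the compositions of the remainder.
import Mathlib
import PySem

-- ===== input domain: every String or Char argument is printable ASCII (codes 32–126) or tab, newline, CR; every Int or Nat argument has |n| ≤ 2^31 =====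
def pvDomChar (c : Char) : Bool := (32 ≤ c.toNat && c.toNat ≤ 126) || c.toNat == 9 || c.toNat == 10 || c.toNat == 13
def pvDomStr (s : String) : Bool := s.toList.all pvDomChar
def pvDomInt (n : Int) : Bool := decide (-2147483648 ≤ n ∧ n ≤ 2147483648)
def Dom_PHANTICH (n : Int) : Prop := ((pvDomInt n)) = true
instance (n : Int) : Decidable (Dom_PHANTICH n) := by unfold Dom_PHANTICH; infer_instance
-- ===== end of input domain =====

-- B replaces A's hard-coded triple nested loop by a recursive length-parameterised
-- generator of even compositions (objective: alternative decomposition, same output).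

-- ===== PORT A =====
def PHANTICH (n : Int) : List (Int × Int × Int × Int) :=
  if PySem.Int.mod n 2 ≠ 0 then []
  else
    (PySem.List.pyRange 2 n 2).foldl (fun ds a =>
      (PySem.List.pyRange 2 (n - a) 2).foldl (fun ds b =>
        (PySem.List.pyRange 2 (n - a - b) 2).foldl (fun ds c =>
          let d := n - a - b - c
          if d ≥ 2 ∧ PySem.Int.mod d 2 = 0 then ds ++ [(a, b, c, d)] else ds) ds) ds) []

-- ===== PORT B =====
-- `parts = 0` is never reached from the top-level call with 4 (Python's helper also
-- returns [] there, after exhausting empty ranges).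
def helperB : Int → Nat → List (List Int)
  | _, 0 => []
  | remaining, 1 =>
      if remaining ≥ 2 ∧ PySem.Int.mod remaining 2 = 0 then [[remaining]] else []
  | remaining, (p + 2) =>
      (PySem.List.pyRange 2 remaining 2).foldl (fun res head =>
        (helperB (remaining - head) (p + 1)).foldl
          (fun res tail => res ++ [head :: tail]) res) []

-- tuple(q) for the 4-element lists helper produces
def toTup4 (q : List Int) : Int × Int × Int × Int :=
  match q with
  | [a, b, c, d] => (a, b, c, d)
  | _ => (0, 0, 0, 0)

def PHANTICH_alt (n : Int) : List (Int × Int × Int × Int) :=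
  if PySem.Int.mod n 2 ≠ 0 then []
  else (helperB n 4).map toTup4

-- ===== PRECONDITION & SPEC =====
def Spec_PHANTICH (n : Int) (out : List (Int × Int × Int × Int)) : Prop := out = PHANTICH_alt n
instance (n : Int) (out : List (Int × Int × Int × Int)) : Decidable (Spec_PHANTICH n out) := by unfold Spec_PHANTICH; infer_instance

-- ===== CLAIM (what is proved, stated in full; the proofs are below) =====
def Claim_equal_PHANTICH : Prop := ∀ (n : Int), Dom_PHANTICH n → Spec_PHANTICH n (PHANTICH n)

-- ===== LEMMAS AND PROOFS =====

/-- A fold that only ever appends to its accumulator is `acc ++ flatMap`. -/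
theorem foldl_flatMap_ext {α β : Type} (g : α → List β) (F : List β → α → List β)
    (h : ∀ acc x, F acc x = acc ++ g x) :
    ∀ (l : List α) (acc : List β), l.foldl F acc = acc ++ l.flatMap g := by
  intro l
  induction l with
  | nil => intro acc; simp
  | cons x xs ih =>
      intro acc
      simp [List.foldl_cons, h, ih, List.flatMap_cons, List.append_assoc]

/-- A's body, loop by loop, as nested flatMaps. -/
theorem A_flat (n : Int) (h : ¬ PySem.Int.mod n 2 ≠ 0) :
    PHANTICH n =
      (PySem.List.pyRange 2 n 2).flatMap (fun a =>
        (PySem.List.pyRange 2 (n - a) 2).flatMap (fun b =>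
          (PySem.List.pyRange 2 (n - a - b) 2).flatMap (fun c =>
            if n - a - b - c ≥ 2 ∧ PySem.Int.mod (n - a - b - c) 2 = 0
            then [(a, b, c, n - a - b - c)] else []))) := by
  have hc : ∀ (a b : Int) (acc : List (Int × Int × Int × Int)),
      (PySem.List.pyRange 2 (n - a - b) 2).foldl (fun ds c =>
          if n - a - b - c ≥ 2 ∧ PySem.Int.mod (n - a - b - c) 2 = 0
          then ds ++ [(a, b, c, n - a - b - c)] else ds) acc
        = acc ++ (PySem.List.pyRange 2 (n - a - b) 2).flatMap (fun c =>
            if n - a - b - c ≥ 2 ∧ PySem.Int.mod (n - a - b - c) 2 = 0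
            then [(a, b, c, n - a - b - c)] else []) :=
    fun a b acc =>
      foldl_flatMap_ext _ _ (fun acc c => by split <;> simp) _ acc
  have hb : ∀ (a : Int) (acc : List (Int × Int × Int × Int)),
      (PySem.List.pyRange 2 (n - a) 2).foldl (fun ds b =>
          (PySem.List.pyRange 2 (n - a - b) 2).foldl (fun ds c =>
            if n - a - b - c ≥ 2 ∧ PySem.Int.mod (n - a - b - c) 2 = 0
            then ds ++ [(a, b, c, n - a - b - c)] else ds) ds) acc
        = acc ++ (PySem.List.pyRange 2 (n - a) 2).flatMap (fun b =>
            (PySem.List.pyRange 2 (n - a - b) 2).flatMap (fun c =>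
              if n - a - b - c ≥ 2 ∧ PySem.Int.mod (n - a - b - c) 2 = 0
              then [(a, b, c, n - a - b - c)] else [])) :=
    fun a acc => foldl_flatMap_ext _ _ (fun acc b => hc a b acc) _ acc
  unfold PHANTICH
  rw [if_neg h]
  exact (foldl_flatMap_ext _ _ (fun acc a => hb a acc) _ []).trans (by simp)

/-- one unfolding of the recursive generator, as a flatMap of prepends -/
theorem helperB_step (r : Int) (p : Nat) :
    helperB r (p + 2) =
      (PySem.List.pyRange 2 r 2).flatMap (fun h =>
        (helperB (r - h) (p + 1)).map (fun t => h :: t)) := by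
  have h1 : ∀ (acc : List (List Int)) (head : Int),
      (helperB (r - head) (p + 1)).foldl (fun res tail => res ++ [head :: tail]) acc
        = acc ++ (helperB (r - head) (p + 1)).map (fun t => head :: t) := by
    intro acc head
    exact PySem.List.foldl_append_singleton_eq_map ..
  have h2 := foldl_flatMap_ext
      (fun head => (helperB (r - head) (p + 1)).map (fun t => head :: t)) _ h1
      (PySem.List.pyRange 2 r 2) []
  show (PySem.List.pyRange 2 r 2).foldl _ [] = _
  exact h2.trans (by simp)

-- ===== VERDICT (by name: the statement is the Claim_ definition above) =====
theorem PHANTICH_spec : Claim_equal_PHANTICH := by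
  intro n _
  unfold Spec_PHANTICH PHANTICH_alt
  by_cases h : PySem.Int.mod n 2 ≠ 0
  · unfold PHANTICH; rw [if_pos h, if_pos h]
  · rw [if_neg h, A_flat n h]
    rw [show (4 : Nat) = 2 + 2 from rfl, helperB_step]
    simp only [List.map_flatMap]
    refine List.flatMap_congr (fun a _ => ?_)
    rw [show (1 : Nat) + 2 = 2 + 1 from rfl, helperB_step]
    simp only [List.map_flatMap, List.map_map]
    refine List.flatMap_congr (fun b _ => ?_)
    rw [helperB_step]
    simp only [List.map_flatMap, List.map_map]
    refine List.flatMap_congr (fun c _ => ?_)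
    show _ = ((helperB (n - a - b - c) 1).map _)
    unfold helperB
    split <;> simp [toTup4]
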